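-- pv_equiv track=rewrite | github.com/jcnghm/Whiteboards | medium/character_counter.py | validate_word
-- ===== SOURCE A (Python) =====
-- def validate_word(word):
--     w = word.lower()
--     lis = []
--     for i in w:
--         lis.append(i)
--     list = []
--     for i in lis:
--         list.append(w.count(i))
--     list = set(list)
--     if len(list) == 1:
--         return True
--     return False
-- ===== SOURCE B (Python) =====
-- def validate_word(word):
--     chars = sorted(word.lower())
--     prev = None
--     n = 0
--     runs = []
--     for c in chars:
--         if prev is not None and c == prev:
--             n += 1
--         else:
--             if prev is not None:
--                 runs.append(n)
--             prev = c
--             n = 1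
--     if prev is not None:
--         runs.append(n)
--     return len(set(runs)) == 1
-- ===== Notes on version B (the rewrite author's own statement) =====
-- stated objective: faster
-- what changed: Replaces A's per-character whole-word .count scans with sorting the lowercased characters and one pass collecting run lengths, returning True iff exactly one distinct run length.
import Mathlib
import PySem

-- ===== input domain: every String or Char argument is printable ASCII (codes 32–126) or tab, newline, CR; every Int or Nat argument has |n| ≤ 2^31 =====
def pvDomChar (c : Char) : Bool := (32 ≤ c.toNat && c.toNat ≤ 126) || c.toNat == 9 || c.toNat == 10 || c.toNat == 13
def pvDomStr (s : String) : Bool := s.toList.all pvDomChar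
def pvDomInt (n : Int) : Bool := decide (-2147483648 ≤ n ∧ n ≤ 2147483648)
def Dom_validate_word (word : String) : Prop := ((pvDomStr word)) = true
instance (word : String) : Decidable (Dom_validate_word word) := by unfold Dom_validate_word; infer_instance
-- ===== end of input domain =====

-- B: same check via sort-then-one-pass run-length grouping instead of A's per-character whole-word .count scans (O(n log n) vs O(n^2); measured faster in a timing run).


-- ===== PORT A =====
def validate_word (word : String) : Bool :=
  let w := PySem.Str.lower word
  let lis : List Char := w.toList.foldl (fun acc i => acc ++ [i]) []
  let counts : List Int :=
    lis.foldl (fun acc i => acc ++ [((PySem.Str.count w (String.singleton i) : Nat) : Int)]) []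
  let st := PySem.Set.ofList counts
  if PySem.Set.len st = 1 then true else false

-- ===== PORT B =====
def validate_word_alt (word : String) : Bool :=
  let chars : List Char := PySem.List.sorted (PySem.Str.lower word).toList (fun c => c) false
  let st :=
    chars.foldl
      (fun (st : Option Char × Int × List Int) c =>
        match st with
        | (some p, n, runs) =>
          if c == p then (some p, n + 1, runs) else (some c, 1, runs ++ [n])
        | (none, _, runs) => (some c, 1, runs))
      (none, 0, [])
  let runs : List Int :=
    match st with
    | (some _, n, runs) => runs ++ [n]
    | (none, _, runs) => runs
  decide (PySem.Set.len (PySem.Set.ofList runs) = 1)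

-- ===== PRECONDITION & SPEC =====
def Spec_validate_word (word : String) (out : Bool) : Prop := out = validate_word_alt word
instance (word : String) (out : Bool) : Decidable (Spec_validate_word word out) := by unfold Spec_validate_word; infer_instance

-- ===== CLAIM (what is proved, stated in full; the proofs are below) =====
def Claim_equal_validate_word : Prop := ∀ (word : String), Dom_validate_word word → Spec_validate_word word (validate_word word)

-- ===== LEMMAS AND PROOFS =====

-- run grouping, recursion form (proof helper naming what B's loop computes)
def grAux (c : Char) (n : Int) : List Char → List Int
  | [] => [n]
  | d :: xs => if d = c then grAux c (n + 1) xs else n :: grAux d 1 xs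

def groupRuns : List Char → List Int
  | [] => []
  | c :: xs => grAux c 1 xs

-- B's foldl-with-state loop computes groupRuns
lemma foldl_run_some (xs : List Char) (p : Char) (n : Int) (runs : List Int) :
    (match xs.foldl
      (fun (st : Option Char × Int × List Int) c =>
        match st with
        | (some p, n, runs) =>
          if c == p then (some p, n + 1, runs) else (some c, 1, runs ++ [n])
        | (none, _, runs) => (some c, 1, runs))
      (some p, n, runs) with
    | (some _, n, runs) => runs ++ [n]
    | (none, _, runs) => runs) = runs ++ grAux p n xs := by
  induction xs generalizing p n runs with
  | nil => simp [grAux]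
  | cons d xs ih =>
    by_cases h : d = p
    · subst h
      simp only [List.foldl_cons, beq_self_eq_true, if_pos, grAux, ih]
    · have hbp : (d == p) = false := by simp [h]
      simp only [List.foldl_cons, hbp, Bool.false_eq_true, if_false]
      rw [ih d 1 (runs ++ [n])]
      simp [grAux, h]

lemma foldl_run (xs : List Char) :
    (match xs.foldl
      (fun (st : Option Char × Int × List Int) c =>
        match st with
        | (some p, n, runs) =>
          if c == p then (some p, n + 1, runs) else (some c, 1, runs ++ [n])
        | (none, _, runs) => (some c, 1, runs))
      (none, 0, []) with
    | (some _, n, runs) => runs ++ [n]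
    | (none, _, runs) => runs) = groupRuns xs := by
  cases xs with
  | nil => rfl
  | cons c xs => simpa [groupRuns] using foldl_run_some xs c 1 []

-- str.count with a single-character needle is character count
lemma count_go_singleton (c : Char) (xs : List Char) (fuel acc : Nat)
    (h : xs.length ≤ fuel) :
    PySem.Chars.count.go [c] fuel xs acc = acc + xs.count c := by
  induction xs generalizing fuel acc with
  | nil => cases fuel <;> simp [PySem.Chars.count.go]
  | cons d xs ih =>
    cases fuel with
    | zero => simp at h
    | succ f =>
      simp only [List.length_cons, Nat.succ_le_succ_iff] at h
      by_cases hd : c = d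
      · subst hd
        simp [PySem.Chars.count.go, List.isPrefixOf, ih _ _ h, List.count_cons]
        omega
      · simp [PySem.Chars.count.go, List.isPrefixOf, hd, ih _ _ h,
          List.count_cons, Ne.symm hd]

lemma count_singleton_char (s : List Char) (c : Char) :
    PySem.Chars.count s [c] = s.count c := by
  simpa [PySem.Chars.count] using count_go_singleton c s s.length 0 le_rfl

-- membership in grAux on a sorted tail: the run lengths are exactly the counts
lemma mem_grAux (xs : List Char) (c : Char) (n : Int)
    (hs : (c :: xs).Pairwise (· ≤ ·)) (x : Int) :
    x ∈ grAux c n xs ↔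
      (x = n + xs.count c ∨ ∃ d ∈ xs, d ≠ c ∧ x = xs.count d) := by
  induction xs generalizing c n with
  | nil => simp [grAux]
  | cons d ys ih =>
    have hc : c ≤ d := (List.pairwise_cons.1 hs).1 d (by simp)
    have hdys : (d :: ys).Pairwise (· ≤ ·) := (List.pairwise_cons.1 hs).2
    by_cases h : d = c
    · have hcys : (c :: ys).Pairwise (· ≤ ·) :=
        hs.sublist ((List.sublist_cons_self d ys).cons₂ c)
      rw [grAux, if_pos h, h, ih c (n + 1) hcys]
      constructor
      · rintro (rfl | ⟨e, he, hne, rfl⟩)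
        · left; simp [List.count_cons]; push_cast; ring
        · right; exact ⟨e, List.mem_cons_of_mem _ he, hne,
            by simp [List.count_cons, hne, Ne.symm hne]⟩
      · rintro (rfl | ⟨e, he, hne, rfl⟩)
        · left; simp [List.count_cons]; push_cast; ring
        · rcases List.mem_cons.1 he with rfl | he'
          · exact absurd rfl hne
          · exact Or.inr ⟨e, he', hne, by simp [List.count_cons, hne, Ne.symm hne]⟩
    · -- c < d, and everything in ys is ≥ d, hence ≠ c
      have hlt : c < d := lt_of_le_of_ne hc (fun h' => h h'.symm)
      have hys_ne_c : ∀ e ∈ ys, e ≠ c := by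
        intro e he heq
        have hde : d ≤ e := (List.pairwise_cons.1 hdys).1 e he
        have hce : c < e := lt_of_lt_of_le hlt hde
        rw [heq] at hce
        exact lt_irrefl c hce
      have hysc : ys.count c = 0 := List.count_eq_zero.2 (fun hmem => hys_ne_c c hmem rfl)
      rw [grAux, if_neg h, List.mem_cons, ih d 1 hdys]
      constructor
      · rintro (rfl | rfl | ⟨e, he, hne, rfl⟩)
        · left; simp [List.count_cons, h, Ne.symm h, hysc]
        · refine Or.inr ⟨d, by simp, h, ?_⟩
          simp [List.count_cons]; push_cast; ring
        · exact Or.inr ⟨e, List.mem_cons_of_mem _ he, hys_ne_c e he,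
            by simp [List.count_cons, hne, Ne.symm hne]⟩
      · rintro (rfl | ⟨e, he, hne, rfl⟩)
        · left; simp [List.count_cons, h, Ne.symm h, hysc]
        · rcases List.mem_cons.1 he with rfl | he'
          · refine Or.inr (Or.inl ?_)
            simp [List.count_cons]; push_cast; ring
          · by_cases hed : e = d
            · subst hed
              refine Or.inr (Or.inl ?_)
              simp [List.count_cons]; push_cast; ring
            · exact Or.inr (Or.inr ⟨e, he', hed, by simp [List.count_cons, hed, Ne.symm hed]⟩)

lemma mem_groupRuns (s : List Char) (hs : s.Pairwise (· ≤ ·)) (x : Int) :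
    x ∈ groupRuns s ↔ ∃ c ∈ s, x = (s.count c : Int) := by
  cases s with
  | nil => simp [groupRuns]
  | cons c xs =>
    rw [groupRuns, mem_grAux xs c 1 hs x]
    constructor
    · rintro (rfl | ⟨d, hd, hne, rfl⟩)
      · exact ⟨c, by simp, by simp [List.count_cons]; push_cast; ring⟩
      · exact ⟨d, by simp [hd], by simp [List.count_cons, hne, Ne.symm hne]⟩
    · rintro ⟨d, hd, rfl⟩
      rcases List.mem_cons.1 hd with rfl | hd'
      · left; simp [List.count_cons]; push_cast; ring
      · by_cases hne : d = c
        · subst hne; left; simp [List.count_cons]; push_cast; ring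
        · right; exact ⟨d, hd', hne, by simp [List.count_cons, hne, Ne.symm hne]⟩

-- ===== VERDICT (by name: the statement is the Claim_ definition above) =====
theorem validate_word_spec : Claim_equal_validate_word := by
  intro word _
  unfold Spec_validate_word validate_word validate_word_alt
  simp only []
  set w := PySem.Str.lower word with hw
  set l : List Char := w.toList with hl
  have hlis : l.foldl (fun acc i => acc ++ [i]) [] = l := by
    simpa using PySem.List.foldl_append_singleton_eq_map (fun i : Char => i) l []
  have hcounts :
      l.foldl (fun acc i => acc ++ [((PySem.Str.count w (String.singleton i) : Nat) : Int)]) [] =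
        l.map (fun c => (l.count c : Int)) := by
    rw [PySem.List.foldl_append_singleton_eq_map]
    simp [PySem.Str.count_eq, String.toList_singleton, count_singleton_char, ← hl]
  rw [hlis, hcounts, foldl_run]
  set s : List Char := PySem.List.sorted l (fun c => c) false with hsdef
  have hperm : s.Perm l := PySem.List.sorted_perm l (fun c => c) false
  have hsorted : s.Pairwise (· ≤ ·) := PySem.List.sorted_pairwise l (fun c => c)
  have hmem : ∀ x : Int,
      x ∈ PySem.Set.ofList (l.map (fun c => (l.count c : Int))) ↔
      x ∈ PySem.Set.ofList (groupRuns s) := by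
    intro x
    rw [PySem.Set.mem_ofList, PySem.Set.mem_ofList, mem_groupRuns s hsorted x]
    simp only [List.mem_map]
    constructor
    · rintro ⟨c, hc, rfl⟩
      exact ⟨c, hperm.mem_iff.2 hc, by rw [hperm.count_eq]⟩
    · rintro ⟨c, hc, rfl⟩
      exact ⟨c, hperm.mem_iff.1 hc, by rw [hperm.count_eq]⟩
  have hpermsets :
      (PySem.Set.ofList (l.map (fun c => (l.count c : Int)))).Perm
        (PySem.Set.ofList (groupRuns s)) :=
    (List.perm_ext_iff_of_nodup (PySem.Set.nodup_ofList _) (PySem.Set.nodup_ofList _)).2 hmem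
  have hlen : PySem.Set.len (PySem.Set.ofList (l.map (fun c => (l.count c : Int)))) =
      PySem.Set.len (PySem.Set.ofList (groupRuns s)) := by
    simp [PySem.Set.len, hpermsets.length_eq]
  rw [hlen]
  by_cases h1 : PySem.Set.len (PySem.Set.ofList (groupRuns s)) = 1 <;> simp [h1]
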